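-- pv_equiv track=rewrite | github.com/PastelKapri/Codingal | python/projects/power.py | powerof8
-- ===== SOURCE A (Python) =====
-- def powerof8(num):
--
--     if num <= 0:
--         return False
--
--     if (num & (num - 1)) != 0:
--         return False
--
--     count = 0
--     while num > 1:
--         num >>= 1
--         count += 1
--
--     return (count % 3 == 0)
-- ===== SOURCE B (Python) =====
-- def powerof8(num):
--     # direct test: strip factors of 8, then the quotient must be 1
--     if num <= 0:
--         return False
--     while num % 8 == 0:
--         num //= 8
--     return num == 1
-- ===== Notes on version B (the rewrite author's own statement) =====
-- stated objective: simpler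
-- what changed: Replaces the power-of-two bit trick plus shift-counting with a direct division loop that strips factors of 8 and checks the remainder is 1.
import Mathlib
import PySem

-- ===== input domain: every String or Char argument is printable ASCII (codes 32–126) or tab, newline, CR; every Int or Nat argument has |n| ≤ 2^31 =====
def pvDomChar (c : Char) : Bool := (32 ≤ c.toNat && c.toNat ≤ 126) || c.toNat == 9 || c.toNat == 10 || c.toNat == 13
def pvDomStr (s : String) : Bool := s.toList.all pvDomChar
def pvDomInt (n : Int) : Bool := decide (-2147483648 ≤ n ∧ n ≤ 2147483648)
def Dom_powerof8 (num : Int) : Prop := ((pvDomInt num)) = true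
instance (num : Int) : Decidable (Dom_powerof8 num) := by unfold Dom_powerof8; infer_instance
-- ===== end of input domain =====

-- B replaces A's power-of-two bit trick plus shift-counting with a direct loop that
-- strips factors of 8 and checks the remainder is 1 (simpler; same asymptotic cost).


-- ===== PORT A =====
-- 'while num > 1: num >>= 1; count += 1'  (Python's >>= 1 on an int is floor division by 2)
def powerof8Shift (num : Int) (count : Int) : Int :=
  if h : 1 < num then powerof8Shift (PySem.Int.floordiv num 2) (count + 1) else count
termination_by num.toNat
decreasing_by
  rw [PySem.Int.floordiv_eq_ediv_of_pos (by omega : (0:Int) < 2)]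
  omega

def powerof8 (num : Int) : Bool :=
  if num ≤ 0 then false
  else if Int.land num (num - 1) ≠ 0 then false
  else powerof8Shift num 0 % 3 == 0

-- ===== PORT B =====
-- 'while num % 8 == 0: num //= 8'; the '0 < num' conjunct only makes the recursion total
-- (Source B reaches this loop only with num ≥ 1, where the loop itself keeps num ≥ 1)
def powerof8Strip (num : Int) : Int :=
  if _h : 0 < num ∧ PySem.Int.mod num 8 = 0 then powerof8Strip (PySem.Int.floordiv num 8) else num
termination_by num.toNat
decreasing_by
  rw [PySem.Int.floordiv_eq_ediv_of_pos (by omega : (0:Int) < 8)]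
  have h8 : num % 8 = 0 := by
    have := PySem.Int.mod_eq_emod_of_pos (a := num) (b := 8) (by omega)
    omega
  omega

def powerof8_alt (num : Int) : Bool :=
  if num ≤ 0 then false else powerof8Strip num == 1

-- ===== PRECONDITION & SPEC =====
def Spec_powerof8 (num : Int) (out : Bool) : Prop := out = powerof8_alt num
instance (num : Int) (out : Bool) : Decidable (Spec_powerof8 num out) := by unfold Spec_powerof8; infer_instance

-- ===== CLAIM (what is proved, stated in full; the proofs are below) =====
def Claim_equal_powerof8 : Prop := ∀ (num : Int), Dom_powerof8 num → Spec_powerof8 num (powerof8 num)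

-- ===== LEMMAS AND PROOFS =====

theorem pv_land_natCast (a b : Nat) : Int.land (a : Int) (b : Int) = ((a &&& b : Nat) : Int) := by
  simp [Int.land]

-- n & (n-1) == 0 tests power-of-two-ness (for n ≥ 1)
theorem pv_land_pred (n : Nat) (h : 1 ≤ n) : (n &&& (n - 1) = 0) ↔ ∃ k, n = 2 ^ k := by
  induction n using Nat.strong_induction_on with
  | _ n IH =>
    rcases Nat.lt_or_ge n 2 with h2 | h2
    · have hn1 : n = 1 := by omega
      subst hn1
      constructor
      · intro _; exact ⟨0, rfl⟩
      · intro _; decide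
    · rcases Nat.even_or_odd n with ⟨m, hm⟩ | ⟨m, hm⟩
      · -- n = 2*m, m ≥ 1
        have hm1 : 1 ≤ m := by omega
        have hb : n = Nat.bit false m := by simp [Nat.bit]; omega
        have hb2 : n - 1 = Nat.bit true (m - 1) := by simp [Nat.bit]; omega
        have hkey : n &&& (n - 1) = 2 * (m &&& (m - 1)) := by
          rw [hb2, hb, Nat.land_bit]; simp [Nat.bit]
        have hIH := IH m (by omega) hm1
        rw [hkey]
        constructor
        · intro hz
          obtain ⟨k, hk⟩ := hIH.mp (by omega)
          exact ⟨k + 1, by rw [pow_succ]; omega⟩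
        · rintro ⟨k, hk⟩
          have hk1 : 1 ≤ k := by
            by_contra hc
            have : k = 0 := by omega
            simp [this] at hk; omega
          have hmk : m = 2 ^ (k - 1) := by
            have : 2 ^ k = 2 * 2 ^ (k - 1) := by
              conv_lhs => rw [show k = (k - 1) + 1 by omega]
              rw [pow_succ]; ring
            omega
          have := hIH.mpr ⟨k - 1, hmk⟩
          omega
      · -- n = 2*m + 1, m ≥ 1
        have hm1 : 1 ≤ m := by omega
        have hb : n = Nat.bit true m := by simp [Nat.bit]; omega
        have hb2 : n - 1 = Nat.bit false m := by simp [Nat.bit]; omega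
        have hkey : n &&& (n - 1) = 2 * m := by
          rw [hb2, hb, Nat.land_bit]; simp [Nat.bit]
        rw [hkey]
        constructor
        · intro hz; omega
        · rintro ⟨k, hk⟩
          have hk1 : 1 ≤ k := by
            by_contra hc
            have : k = 0 := by omega
            simp [this] at hk; omega
          have : 2 ∣ 2 ^ k := dvd_pow_self 2 (by omega)
          omega

-- A's shift loop on a power of two counts the exponent
theorem pv_shift_pow2 (k : Nat) (c : Int) : powerof8Shift ((2 ^ k : Nat) : Int) c = c + k := by
  induction k generalizing c with
  | zero => rw [powerof8Shift]; norm_num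
  | succ k IH =>
    rw [powerof8Shift]
    have hgt : (1 : Int) < ((2 ^ (k + 1) : Nat) : Int) := by
      have : 2 ≤ 2 ^ (k + 1) := Nat.one_lt_two_pow (by omega)
      exact_mod_cast this
    rw [dif_pos hgt]
    have hdiv : PySem.Int.floordiv ((2 ^ (k + 1) : Nat) : Int) 2 = ((2 ^ k : Nat) : Int) := by
      rw [PySem.Int.floordiv_eq_ediv_of_pos (by omega : (0:Int) < 2)]
      have : ((2 ^ (k + 1) : Nat) : Int) = 2 * ((2 ^ k : Nat) : Int) := by
        push_cast [pow_succ]; ring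
      rw [this, Int.mul_ediv_cancel_left _ (by omega)]
    rw [hdiv, IH]
    push_cast; ring

-- B's strip loop reaches 1 exactly on powers of 8
theorem pv_strip_eq_one_iff : ∀ (fuel : Nat) (num : Int), num.toNat = fuel → 0 < num →
    (powerof8Strip num = 1 ↔ ∃ k : Nat, num = (8 : Int) ^ k) := by
  intro fuel
  induction fuel using Nat.strong_induction_on with
  | _ fuel IH =>
    intro num hfuel hpos
    have hmod : PySem.Int.mod num 8 = num % 8 :=
      PySem.Int.mod_eq_emod_of_pos (by omega)
    by_cases h8 : num % 8 = 0
    · -- divisible: recurse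
      have hge : 8 ≤ num := by omega
      have hq : PySem.Int.floordiv num 8 = num / 8 :=
        PySem.Int.floordiv_eq_ediv_of_pos (by omega)
      have hqpos : 0 < num / 8 := by omega
      have hqeq : 8 * (num / 8) = num := by omega
      rw [powerof8Strip, dif_pos ⟨hpos, by omega⟩, hq]
      have hlt : (num / 8).toNat < fuel := by omega
      rw [IH (num / 8).toNat hlt (num / 8) rfl hqpos]
      constructor
      · rintro ⟨k, hk⟩
        exact ⟨k + 1, by rw [pow_succ]; omega⟩
      · rintro ⟨k, hk⟩
        have hk1 : 1 ≤ k := by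
          by_contra hc
          have : k = 0 := by omega
          simp [this] at hk; omega
        refine ⟨k - 1, ?_⟩
        have : (8 : Int) ^ k = 8 * 8 ^ (k - 1) := by
          conv_lhs => rw [show k = (k - 1) + 1 by omega]
          rw [pow_succ]; ring
        omega
    · -- not divisible: loop exits with current num
      have hcond : ¬ (0 < num ∧ PySem.Int.mod num 8 = 0) := by
        rw [hmod]; omega
      rw [powerof8Strip, dif_neg hcond]
      constructor
      · intro h1; exact ⟨0, by omega⟩
      · rintro ⟨k, hk⟩
        rcases Nat.eq_zero_or_pos k with hk0 | hk1
        · simp [hk0] at hk; omega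
        · exfalso
          have : (8 : Int) ∣ 8 ^ k := dvd_pow_self 8 (by omega)
          have : (8 : Int) ∣ num := hk ▸ this
          omega

-- exponent arithmetic: 2^j is a power of 8 iff 3 ∣ j
theorem pv_pow2_pow8 (j : Nat) : (3 ∣ j) ↔ ∃ k : Nat, (2 : Nat) ^ j = 8 ^ k := by
  constructor
  · rintro ⟨m, hm⟩
    exact ⟨m, by rw [hm, pow_mul]; norm_num⟩
  · rintro ⟨k, hk⟩
    have h8 : (8 : Nat) ^ k = 2 ^ (3 * k) := by rw [pow_mul]; norm_num
    rw [h8] at hk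
    have := Nat.pow_right_injective (le_refl 2) hk
    exact ⟨k, this⟩

-- A returns true exactly on powers of 8 (for 0 < num)
theorem pv_A_iff (num : Int) (hpos : 0 < num) :
    (powerof8 num = true ↔ ∃ k : Nat, num = (8 : Int) ^ k) := by
  set n := num.toNat with hn
  have hcast : (n : Int) = num := Int.toNat_of_nonneg (by omega)
  have hn1 : 1 ≤ n := by omega
  have hcast1 : ((n - 1 : Nat) : Int) = num - 1 := by omega
  have hland : Int.land num (num - 1) = ((n &&& (n - 1) : Nat) : Int) := by
    rw [← hcast1, ← hcast, pv_land_natCast]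
  -- the Int-level power-of-8 statement matches the Nat-level one
  have hbridge : (∃ k : Nat, num = (8 : Int) ^ k) ↔ ∃ k : Nat, n = 8 ^ k := by
    constructor
    · rintro ⟨k, hk⟩
      refine ⟨k, ?_⟩
      have : ((8 ^ k : Nat) : Int) = (8 : Int) ^ k := by push_cast; ring
      omega
    · rintro ⟨k, hk⟩
      refine ⟨k, ?_⟩
      have : ((8 ^ k : Nat) : Int) = (8 : Int) ^ k := by push_cast; ring
      omega
  unfold powerof8
  rw [if_neg (by omega)]
  by_cases hl : Int.land num (num - 1) ≠ 0
  · rw [if_pos hl]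
    simp only [Bool.false_eq_true, false_iff]
    rintro ⟨k, hk⟩
    obtain ⟨k', hk'⟩ := hbridge.mp ⟨k, hk⟩
    have hp2 : n = 2 ^ (3 * k') := by rw [hk', pow_mul]; norm_num
    have : n &&& (n - 1) = 0 := (pv_land_pred n hn1).mpr ⟨3 * k', hp2⟩
    rw [hland] at hl
    omega
  · rw [if_neg hl]
    have hl0 : Int.land num (num - 1) = 0 := not_not.mp hl
    rw [hland] at hl0
    have hz : n &&& (n - 1) = 0 := by omega
    obtain ⟨j, hj⟩ := (pv_land_pred n hn1).mp hz
    have hnum : num = ((2 ^ j : Nat) : Int) := by omega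
    have hsh : powerof8Shift num 0 = (j : Int) := by
      rw [hnum, pv_shift_pow2 j 0]; ring
    rw [hsh]
    simp only [beq_iff_eq]
    rw [hbridge, hj, ← pv_pow2_pow8 j]
    omega

-- ===== VERDICT (by name: the statement is the Claim_ definition above) =====
theorem powerof8_spec : Claim_equal_powerof8 := by
  intro num _
  unfold Spec_powerof8
  by_cases hpos : num ≤ 0
  · unfold powerof8 powerof8_alt
    rw [if_pos hpos, if_pos hpos]
  · rw [Int.not_le] at hpos
    have hA := pv_A_iff num hpos
    have hB := pv_strip_eq_one_iff num.toNat num rfl hpos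
    have halt : powerof8_alt num = (powerof8Strip num == 1) := by
      unfold powerof8_alt; rw [if_neg (by omega)]
    rw [Bool.eq_iff_iff, hA, halt]
    simp only [beq_iff_eq]
    exact hB.symm
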